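-- pv_equiv track=rewrite | github.com/Melodiz/CodeRun | ML/Easy/587_cat_search/solution.py | mark_all_islands
-- ===== SOURCE A (Python) =====
-- def mark_all_islands(matrix):
--     if not matrix or not matrix[0]:
--         return matrix, 0
--
--     def dfs(matrix, i, j, island_id):
--         if i < 0 or i >= len(matrix) or j < 0 or j >= len(matrix[0]) or matrix[i][j] != 1:
--             return
--         matrix[i][j] = island_id
--         dfs(matrix, i + 1, j, island_id)
--         dfs(matrix, i - 1, j, island_id)
--         dfs(matrix, i, j + 1, island_id)
--         dfs(matrix, i, j - 1, island_id)
--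
--     island_id = 2  # Start marking islands from 2 since 1 is already used in the matrix
--     for i in range(len(matrix)):
--         for j in range(len(matrix[0])):
--             if matrix[i][j] == 1:
--                 dfs(matrix, i, j, island_id)
--                 island_id += 1
--     return matrix, island_id - 2
-- ===== SOURCE B (Python) =====
-- def mark_all_islands(matrix):
--     if not matrix or not matrix[0]:
--         return matrix, 0
--     rows, cols = len(matrix), len(matrix[0])
--
--     def val(a, b):
--         return matrix[a][b] if 0 <= a < rows and 0 <= b < cols else None
--
--     next_id = 2
--     for i, j in [(i, j) for i in range(rows) for j in range(cols)]:
--         if matrix[i][j] == 1: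
--             todo = [(i, j)]
--             while todo:
--                 a, b = todo.pop()
--                 if val(a, b) == 1:
--                     matrix[a][b] = next_id
--                     todo += [(a, b - 1), (a, b + 1), (a - 1, b), (a + 1, b)]
--             next_id += 1
--     return matrix, next_id - 2
-- ===== Notes on version B (the rewrite author's own statement) =====
-- stated objective: alternative
-- what changed: The recursive DFS is replaced by an iterative flood fill: one flat pass over a precomputed list of all (i,j) cells, and for each unlabeled 1 an explicit worklist (append four neighbours, pop from the end, mark via a bounds-checked Option-style accessor) instead of four-way recursion.
import Mathlib
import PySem

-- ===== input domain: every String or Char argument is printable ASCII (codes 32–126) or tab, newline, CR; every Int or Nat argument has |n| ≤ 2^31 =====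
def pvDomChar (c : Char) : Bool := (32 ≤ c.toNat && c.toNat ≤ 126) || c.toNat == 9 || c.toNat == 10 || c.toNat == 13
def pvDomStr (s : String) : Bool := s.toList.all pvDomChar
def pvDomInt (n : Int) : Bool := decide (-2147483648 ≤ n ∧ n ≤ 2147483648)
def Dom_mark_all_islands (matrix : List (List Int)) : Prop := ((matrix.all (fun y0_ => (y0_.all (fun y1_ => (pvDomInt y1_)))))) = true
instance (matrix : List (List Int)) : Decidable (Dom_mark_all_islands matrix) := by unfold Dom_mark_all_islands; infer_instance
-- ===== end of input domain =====

-- B replaces A's recursive DFS by an iterative flood fill: one flat pass over the list of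
-- all (i,j) cells and an explicit end-popped worklist with a bounds-checked Option accessor.
-- Both Pythons mutate `matrix` in place; the equivalence proved here is about the return value.

-- ===== PORT A =====
-- matrix[i][j] (read after the bounds guard; default never used on admitted inputs)
def pvCell (m : List (List Int)) (i j : Int) : Int := (m.getD i.toNat []).getD j.toNat 0
-- matrix[i][j] = v
def pvSet (m : List (List Int)) (i j : Int) (v : Int) : List (List Int) :=
  m.set i.toNat ((m.getD i.toNat []).set j.toNat v)

-- dfs(matrix, i, j, island_id); fuel is a totality guard only (chosen large enough below)
def dfsF : Nat → List (List Int) → Int → Int → Int → List (List Int)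
  | 0, m, _, _, _ => m
  | f+1, m, i, j, id =>
    if i < 0 ∨ (m.length : Int) ≤ i ∨ j < 0 ∨ ((m.headD []).length : Int) ≤ j ∨ pvCell m i j ≠ 1 then
      m
    else
      dfsF f (dfsF f (dfsF f (dfsF f (pvSet m i j id) (i+1) j id) (i-1) j id) i (j+1) id) i (j-1) id

-- the inner 'for j in range(len(matrix[0])): if matrix[i][j] == 1: dfs(...); island_id += 1'
def pvRowScanA (F : Nat) (cols : Int) (st : List (List Int) × Int) (i : Int) : List (List Int) × Int :=
  (PySem.List.pyRange 0 cols 1).foldl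
    (fun st j => if pvCell st.1 i j = 1 then (dfsF F st.1 i j st.2, st.2 + 1) else st) st

def mark_all_islands (matrix : List (List Int)) : List (List Int) × Int :=
  if matrix = [] ∨ matrix.headD [] = [] then (matrix, 0)
  else
    let F := (matrix.map List.length).sum + 1
    let st := (PySem.List.pyRange 0 (matrix.length : Int) 1).foldl
      (pvRowScanA F ((matrix.headD []).length : Int)) (matrix, 2)
    (st.1, st.2 - 2)

-- ===== PORT B =====
-- '[(i, j) for i in range(rows) for j in range(cols)]'
def bCells (rows cols : Int) : List (Int × Int) :=
  (PySem.List.pyRange 0 rows 1).flatMap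
    (fun i => (PySem.List.pyRange 0 cols 1).map (fun j => (i, j)))

-- 'def val(a, b): return matrix[a][b] if 0 <= a < rows and 0 <= b < cols else None'
def bVal (m : List (List Int)) (rows cols a b : Int) : Option Int :=
  if 0 ≤ a ∧ a < rows ∧ 0 ≤ b ∧ b < cols then
    some (PySem.List.pyGetD (PySem.List.pyGetD m a []) b 0)
  else none

-- 'matrix[a][b] = v'
def bMark (m : List (List Int)) (a b v : Int) : List (List Int) :=
  m.modify a.toNat (fun r => r.set b.toNat v)

-- the 'while todo:' worklist loop; todo.pop() pops the END; fuel is a totality guard only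
def bFill : Nat → List (List Int) → Int → Int → Int → List (Int × Int) → List (List Int)
  | 0, m, _, _, _, _ => m
  | f+1, m, rows, cols, id, todo =>
    match PySem.List.pop? todo (-1) with
    | none => m
    | some ((a, b), rest) =>
      if bVal m rows cols a b = some 1 then
        bFill f (bMark m a b id) rows cols id
          (rest ++ [(a, b - 1), (a, b + 1), (a - 1, b), (a + 1, b)])
      else
        bFill f m rows cols id rest

def mark_all_islands_alt (matrix : List (List Int)) : List (List Int) × Int :=
  if matrix = [] ∨ matrix.headD [] = [] then (matrix, 0)
  else
    let rows : Int := matrix.length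
    let cols : Int := (matrix.headD []).length
    let F := 5 * (matrix.map List.length).sum + 2
    let st := (bCells rows cols).foldl
      (fun st c =>
        if PySem.List.pyGetD (PySem.List.pyGetD st.1 c.1 []) c.2 0 = 1 then
          (bFill F st.1 rows cols st.2 [c], st.2 + 1)
        else st)
      (matrix, 2)
    (st.1, st.2 - 2)

-- ===== PRECONDITION & SPEC =====
-- Pre_ excludes exactly the ragged matrices (nonempty first row, some row shorter than it)
-- on which Python A raises IndexError at matrix[i][j]; nothing A returns on is excluded.
def Pre_mark_all_islands (matrix : List (List Int)) : Prop :=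
  matrix = [] ∨ matrix.headD [] = [] ∨ ∀ row ∈ matrix, (matrix.headD []).length ≤ row.length

instance (matrix : List (List Int)) : Decidable (Pre_mark_all_islands matrix) := by
  unfold Pre_mark_all_islands; infer_instance

def pvWitness_mark_all_islands : List (List Int) := [[1, 0], [0, 1]]

def Spec_mark_all_islands (matrix : List (List Int)) (out : List (List Int) × Int) : Prop := out = mark_all_islands_alt matrix
instance (matrix : List (List Int)) (out : List (List Int) × Int) : Decidable (Spec_mark_all_islands matrix out) := by unfold Spec_mark_all_islands; infer_instance

-- ===== CLAIM (what is proved, stated in full; the proofs are below) =====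
def Claim_equal_mark_all_islands : Prop := ∀ (matrix : List (List Int)), Dom_mark_all_islands matrix → Pre_mark_all_islands matrix → Spec_mark_all_islands matrix (mark_all_islands matrix)

-- ===== LEMMAS AND PROOFS =====

-- number of cells equal to 1
def pvOnes : List (List Int) → Nat
  | [] => 0
  | r :: t => r.count 1 + pvOnes t

theorem count_set_eq (l : List Int) (j : Nat) (v : Int) (h : l.getD j 0 = 1) :
    (l.set j v).count 1 + (if v = 1 then 0 else 1) = l.count 1 := by
  induction l generalizing j with
  | nil => simp at h
  | cons a t ih =>
    cases j with
    | zero =>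
      simp at h
      subst h
      simp [List.count_cons]
      split_ifs <;> omega
    | succ j =>
      simp at h
      have := ih j h
      simp [List.count_cons]
      split_ifs at this ⊢ <;> omega

theorem ones_set_eq (m : List (List Int)) (i j v : Int) (h : pvCell m i j = 1) :
    pvOnes (pvSet m i j v) + (if v = 1 then 0 else 1) = pvOnes m := by
  unfold pvCell at h
  unfold pvSet
  generalize i.toNat = k at *
  generalize j.toNat = jn at *
  induction m generalizing k with
  | nil => simp at h
  | cons r t ih =>
    cases k with
    | zero =>
      simp at h ⊢
      simp [pvOnes]
      have := count_set_eq r jn v h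
      omega
    | succ k =>
      simp only [List.getD_cons_succ] at h
      simp only [List.set_cons_succ, List.getD_cons_succ, pvOnes]
      have := ih k h
      omega

theorem ones_set_lt (m : List (List Int)) (i j v : Int) (h : pvCell m i j = 1) (hv : v ≠ 1) :
    pvOnes (pvSet m i j v) < pvOnes m := by
  have := ones_set_eq m i j v h
  split_ifs at this with h1
  · exact absurd h1 hv
  · omega

theorem ones_set_le (m : List (List Int)) (i j v : Int) (h : pvCell m i j = 1) :
    pvOnes (pvSet m i j v) ≤ pvOnes m := by
  have := ones_set_eq m i j v h
  split_ifs at this <;> omega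

theorem ones_pos (m : List (List Int)) (i j : Int) (h : pvCell m i j = 1) : 1 ≤ pvOnes m := by
  have := ones_set_eq m i j 0 h
  simp at this
  omega

theorem dfs_ones_le (f : Nat) : ∀ (m : List (List Int)) (i j id : Int),
    pvOnes (dfsF f m i j id) ≤ pvOnes m := by
  induction f with
  | zero => intro m i j id; simp [dfsF]
  | succ f ih =>
    intro m i j id
    simp only [dfsF]
    split
    · exact le_refl _
    · rename_i hg
      push_neg at hg
      calc pvOnes _ ≤ pvOnes (dfsF f (dfsF f (dfsF f (pvSet m i j id) (i+1) j id) (i-1) j id) i (j+1) id) := ih _ _ _ _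
        _ ≤ pvOnes (dfsF f (dfsF f (pvSet m i j id) (i+1) j id) (i-1) j id) := ih _ _ _ _
        _ ≤ pvOnes (dfsF f (pvSet m i j id) (i+1) j id) := ih _ _ _ _
        _ ≤ pvOnes (pvSet m i j id) := ih _ _ _ _
        _ ≤ pvOnes m := ones_set_le m i j id hg.2.2.2.2

-- matrix[a][b] = v written with List.modify (B) is the same value as written with List.set (A)
theorem bMark_eq (m : List (List Int)) (a b v : Int) : bMark m a b v = pvSet m a b v := by
  unfold bMark pvSet
  generalize a.toNat = k
  induction m generalizing k with
  | nil => simp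
  | cons r t ih =>
    cases k with
    | zero => simp [List.modify]
    | succ k => simpa [List.modify] using ih k

-- pvSet preserves the outer length and the length of the first row
theorem set_len (m : List (List Int)) (i j v : Int) : (pvSet m i j v).length = m.length := by
  simp [pvSet]

theorem set_head_len (m : List (List Int)) (i j v : Int) :
    ((pvSet m i j v).headD []).length = (m.headD []).length := by
  unfold pvSet
  cases m with
  | nil => simp
  | cons r t =>
    cases hk : i.toNat with
    | zero => simp
    | succ k => simp

theorem dfs_len (f : Nat) : ∀ (m : List (List Int)) (i j id : Int),
    (dfsF f m i j id).length = m.length ∧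
      ((dfsF f m i j id).headD []).length = (m.headD []).length := by
  induction f with
  | zero => intro m i j id; simp [dfsF]
  | succ f ih =>
    intro m i j id
    simp only [dfsF]
    split
    · exact ⟨rfl, rfl⟩
    · have h1 := ih (pvSet m i j id) (i+1) j id
      have h2 := ih (dfsF f (pvSet m i j id) (i+1) j id) (i-1) j id
      have h3 := ih (dfsF f (dfsF f (pvSet m i j id) (i+1) j id) (i-1) j id) i (j+1) id
      have h4 := ih (dfsF f (dfsF f (dfsF f (pvSet m i j id) (i+1) j id) (i-1) j id) i (j+1) id) i (j-1) id
      have h5 := set_len m i j id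
      have h6 := set_head_len m i j id
      constructor <;> omega

-- if val(a,b) == 1 then the cell exists, is in the (rows, cols) box and equals 1
theorem bVal_one (m : List (List Int)) (rows cols a b : Int) (h : bVal m rows cols a b = some 1) :
    pvCell m a b = 1 := by
  unfold bVal at h
  split_ifs at h with hg
  · rw [PySem.List.pyGetD_of_nonneg _ _ hg.1, PySem.List.pyGetD_of_nonneg _ _ hg.2.2.1] at h
    exact Option.some.inj h

-- under the invariant rows = len(m), cols = len(m[0]), val(a,b)==1 is exactly A's guard
theorem bVal_iff (m : List (List Int)) (rows cols a b : Int)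
    (hr : (m.length : Int) = rows) (hc : ((m.headD []).length : Int) = cols) :
    bVal m rows cols a b = some 1 ↔
      ¬(a < 0 ∨ (m.length : Int) ≤ a ∨ b < 0 ∨ ((m.headD []).length : Int) ≤ b ∨ pvCell m a b ≠ 1) := by
  subst hr hc
  unfold bVal
  split_ifs with hg
  · rw [PySem.List.pyGetD_of_nonneg _ _ hg.1, PySem.List.pyGetD_of_nonneg _ _ hg.2.2.1]
    unfold pvCell
    constructor
    · intro h
      simp at h
      push_neg
      exact ⟨hg.1, hg.2.1, hg.2.2.1, hg.2.2.2, h⟩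
    · intro h
      push_neg at h
      exact congrArg some h.2.2.2.2
  · constructor
    · intro h; simp at h
    · intro h
      push_neg at h
      exact absurd ⟨h.1, h.2.1, h.2.2.1, h.2.2.2.1⟩ hg

-- bFill's result does not depend on the fuel once it exceeds 5*ones + |todo|
theorem fill_irrel (k : Nat) : ∀ (m : List (List Int)) (rows cols id : Int)
    (s : List (Int × Int)) (fa fb : Nat),
    5 * pvOnes m + s.length ≤ k → id ≠ 1 → k < fa → k < fb →
    bFill fa m rows cols id s = bFill fb m rows cols id s := by
  induction k with
  | zero =>
    intro m rows cols id s fa fb hk hid hfa hfb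
    obtain ⟨fa, rfl⟩ : ∃ f, fa = f + 1 := ⟨fa - 1, by omega⟩
    obtain ⟨fb, rfl⟩ : ∃ f, fb = f + 1 := ⟨fb - 1, by omega⟩
    match s with
    | [] => simp [bFill, PySem.List.pop?]
    | (a, b) :: s => simp at hk
  | succ k ih =>
    intro m rows cols id s fa fb hk hid hfa hfb
    obtain ⟨fa, rfl⟩ : ∃ f, fa = f + 1 := ⟨fa - 1, by omega⟩
    obtain ⟨fb, rfl⟩ : ∃ f, fb = f + 1 := ⟨fb - 1, by omega⟩
    match hs : s with
    | [] => simp [bFill, PySem.List.pop?]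
    | p :: t =>
      obtain ⟨u, x, he⟩ : ∃ u x, p :: t = u ++ [x] :=
        ⟨(p :: t).dropLast, (p :: t).getLast (by simp), (List.dropLast_append_getLast (by simp)).symm⟩
      obtain ⟨a, b⟩ := x
      have hlen : t.length = u.length := by
        have := congrArg List.length he
        simp at this
        omega
      rw [he]
      simp only [bFill, PySem.List.pop?_last]
      split
      · rename_i hg
        have hlt := ones_set_lt m a b id (bVal_one _ _ _ _ _ hg) hid
        rw [bMark_eq]
        refine ih _ _ _ _ _ _ _ ?_ hid (by omega) (by omega)
        simp at hk ⊢
        omega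
      · refine ih _ _ _ _ _ _ _ ?_ hid (by omega) (by omega)
        simp at hk ⊢
        omega

-- core simulation: one worklist entry popped at the end behaves like one dfs call
theorem simB (n : Nat) : ∀ (m : List (List Int)) (rows cols i j id : Int)
    (s : List (Int × Int)) (fL fL' fD : Nat),
    pvOnes m ≤ n → id ≠ 1 →
    (m.length : Int) = rows → ((m.headD []).length : Int) = cols →
    5 * n + s.length + 1 < fL → 5 * n + s.length < fL' → n < fD →
    bFill fL m rows cols id (s ++ [(i, j)]) = bFill fL' (dfsF fD m i j id) rows cols id s := by
  induction n with
  | zero =>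
    intro m rows cols i j id s fL fL' fD hn hid hr hc hfL hfL' hfD
    obtain ⟨fL, rfl⟩ : ∃ f, fL = f + 1 := ⟨fL - 1, by omega⟩
    obtain ⟨fD, rfl⟩ : ∃ f, fD = f + 1 := ⟨fD - 1, by omega⟩
    simp only [bFill, PySem.List.pop?_last, dfsF]
    by_cases hC : bVal m rows cols i j = some 1
    · have := ones_pos m i j (bVal_one _ _ _ _ _ hC)
      omega
    · rw [if_neg hC, if_pos (by rw [bVal_iff m rows cols i j hr hc] at hC; push_neg at hC; tauto)]
      exact fill_irrel s.length m rows cols id s fL fL' (by omega) hid (by omega) (by omega)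
  | succ n ih =>
    intro m rows cols i j id s fL fL' fD hn hid hr hc hfL hfL' hfD
    obtain ⟨fL, rfl⟩ : ∃ f, fL = f + 1 := ⟨fL - 1, by omega⟩
    obtain ⟨fD, rfl⟩ : ∃ f, fD = f + 1 := ⟨fD - 1, by omega⟩
    simp only [bFill, PySem.List.pop?_last, dfsF]
    by_cases hC : bVal m rows cols i j = some 1
    · rw [if_pos hC, if_neg (by rw [bVal_iff m rows cols i j hr hc] at hC; exact hC)]
      rw [bMark_eq]
      have hcell := bVal_one _ _ _ _ _ hC
      have h1 : pvOnes (pvSet m i j id) ≤ n := by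
        have := ones_set_lt m i j id hcell hid; omega
      have hr1 : ((pvSet m i j id).length : Int) = rows := by rw [set_len]; exact hr
      have hc1 : (((pvSet m i j id).headD []).length : Int) = cols := by rw [set_head_len]; exact hc
      have e1 := ih (pvSet m i j id) rows cols (i+1) j id
        (s ++ [(i, j-1), (i, j+1)] ++ [(i-1, j)]) fL fL fD h1 hid hr1 hc1
        (by simp; omega) (by simp; omega) (by omega)
      have hre : s ++ [(i, j - 1), (i, j + 1), (i - 1, j), (i + 1, j)]
          = (s ++ [(i, j-1), (i, j+1)] ++ [(i-1, j)]) ++ [(i+1, j)] := by simp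
      rw [hre, e1]
      have h2 : pvOnes (dfsF fD (pvSet m i j id) (i+1) j id) ≤ n :=
        le_trans (dfs_ones_le fD _ _ _ _) h1
      have hl2 := dfs_len fD (pvSet m i j id) (i+1) j id
      have e2 := ih _ rows cols (i-1) j id (s ++ [(i, j-1)] ++ [(i, j+1)]) fL fL fD h2 hid
        (by rw [hl2.1]; exact hr1) (by rw [hl2.2]; exact hc1)
        (by simp; omega) (by simp; omega) (by omega)
      rw [show s ++ [(i, j-1), (i, j+1)] = s ++ [(i, j-1)] ++ [(i, j+1)] by simp] at e1 ⊢
      rw [e2]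
      have h3 : pvOnes (dfsF fD (dfsF fD (pvSet m i j id) (i+1) j id) (i-1) j id) ≤ n :=
        le_trans (dfs_ones_le fD _ _ _ _) h2
      have hl3 := dfs_len fD (dfsF fD (pvSet m i j id) (i+1) j id) (i-1) j id
      have e3 := ih _ rows cols i (j+1) id (s ++ [(i, j-1)]) fL fL fD h3 hid
        (by rw [hl3.1, hl2.1]; exact hr1) (by rw [hl3.2, hl2.2]; exact hc1)
        (by simp; omega) (by simp; omega) (by omega)
      rw [e3]
      have h4 : pvOnes (dfsF fD (dfsF fD (dfsF fD (pvSet m i j id) (i+1) j id) (i-1) j id) i (j+1) id) ≤ n :=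
        le_trans (dfs_ones_le fD _ _ _ _) h3
      have hl4 := dfs_len fD (dfsF fD (dfsF fD (pvSet m i j id) (i+1) j id) (i-1) j id) i (j+1) id
      exact ih _ rows cols i (j-1) id s fL fL' fD h4 hid
        (by rw [hl4.1, hl3.1, hl2.1]; exact hr1) (by rw [hl4.2, hl3.2, hl2.2]; exact hc1)
        (by omega) (by omega) (by omega)
    · rw [if_neg hC, if_pos (by rw [bVal_iff m rows cols i j hr hc] at hC; push_neg at hC; tauto)]
      exact fill_irrel (5 * n + 5 + s.length) m rows cols id s fL fL'
        (by omega) hid (by omega) (by omega)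

theorem body_eq (N : Nat) (m : List (List Int)) (rows cols i j id : Int)
    (hm : pvOnes m ≤ N) (hid : id ≠ 1)
    (hr : (m.length : Int) = rows) (hc : ((m.headD []).length : Int) = cols) :
    bFill (5 * N + 2) m rows cols id [(i, j)] = dfsF (N + 1) m i j id := by
  have := simB N m rows cols i j id [] (5 * N + 2) (5 * N + 1) (N + 1)
    hm hid hr hc (by simp) (by simp) (by omega)
  simpa [bFill, PySem.List.pop?] using this

-- per-row equality of the two inner bodies (fold over the j's of one row)
theorem inner_eq (N : Nat) (rows cols : Int) (js : List Int) :
    ∀ (m : List (List Int)) (id i : Int),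
    pvOnes m ≤ N → 2 ≤ id → 0 ≤ i →
    (m.length : Int) = rows → ((m.headD []).length : Int) = cols →
    (∀ j ∈ js, 0 ≤ j) →
    js.foldl (fun st j => if pvCell st.1 i j = 1 then (dfsF (N + 1) st.1 i j st.2, st.2 + 1) else st) (m, id)
      = js.foldl (fun st j =>
          if PySem.List.pyGetD (PySem.List.pyGetD st.1 i []) j 0 = 1 then
            (bFill (5 * N + 2) st.1 rows cols st.2 [(i, j)], st.2 + 1)
          else st) (m, id) := by
  induction js with
  | nil => intro m id i hm hid hi hr hc hjs; rfl
  | cons j js ih =>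
    intro m id i hm hid hi hr hc hjs
    have hj : 0 ≤ j := hjs j (by simp)
    have hguard : (PySem.List.pyGetD (PySem.List.pyGetD m i []) j 0 = 1) ↔ pvCell m i j = 1 := by
      rw [PySem.List.pyGetD_of_nonneg _ _ hi, PySem.List.pyGetD_of_nonneg _ _ hj]
      exact Iff.rfl
    simp only [List.foldl_cons]
    by_cases hc1 : pvCell m i j = 1
    · rw [if_pos hc1, if_pos (hguard.mpr hc1), body_eq N m rows cols i j id hm (by omega) hr hc]
      have hl := dfs_len (N + 1) m i j id
      exact ih (dfsF (N + 1) m i j id) (id + 1) i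
        (le_trans (dfs_ones_le _ _ _ _ _) hm) (by omega) hi
        (by rw [hl.1]; exact hr) (by rw [hl.2]; exact hc)
        (fun x hx => hjs x (by simp [hx]))
    · rw [if_neg hc1, if_neg (fun h => hc1 (hguard.mp h))]
      exact ih m id i hm hid hi hr hc (fun x hx => hjs x (by simp [hx]))

-- the A-side inner fold preserves the invariants
theorem inner_inv (N : Nat) (js : List Int) : ∀ (m : List (List Int)) (id i : Int),
    pvOnes m ≤ N → 2 ≤ id →
    pvOnes (js.foldl (fun st j => if pvCell st.1 i j = 1 then (dfsF (N + 1) st.1 i j st.2, st.2 + 1) else st) (m, id)).1 ≤ N ∧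
      2 ≤ (js.foldl (fun st j => if pvCell st.1 i j = 1 then (dfsF (N + 1) st.1 i j st.2, st.2 + 1) else st) (m, id)).2 ∧
      (js.foldl (fun st j => if pvCell st.1 i j = 1 then (dfsF (N + 1) st.1 i j st.2, st.2 + 1) else st) (m, id)).1.length = m.length ∧
      ((js.foldl (fun st j => if pvCell st.1 i j = 1 then (dfsF (N + 1) st.1 i j st.2, st.2 + 1) else st) (m, id)).1.headD []).length = (m.headD []).length := by
  induction js with
  | nil => intro m id i hm hid; exact ⟨hm, hid, rfl, rfl⟩
  | cons j js ih =>
    intro m id i hm hid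
    simp only [List.foldl_cons]
    by_cases hc : pvCell m i j = 1
    · rw [if_pos hc]
      have hl := dfs_len (N + 1) m i j id
      have := ih (dfsF (N + 1) m i j id) (id + 1) i
        (le_trans (dfs_ones_le _ _ _ _ _) hm) (by omega)
      exact ⟨this.1, this.2.1, by omega, by omega⟩
    · rw [if_neg hc]
      exact ih m id i hm hid

-- the outer folds agree (A: nested pyRange folds; B's nested form, reached from the flat fold below)
theorem outer_eq (N : Nat) (rows cols : Int) (is : List Int) : ∀ (m : List (List Int)) (id : Int),
    pvOnes m ≤ N → 2 ≤ id →
    (m.length : Int) = rows → ((m.headD []).length : Int) = cols →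
    (∀ i ∈ is, 0 ≤ i) →
    is.foldl (pvRowScanA (N + 1) cols) (m, id)
      = is.foldl (fun st i => (PySem.List.pyRange 0 cols 1).foldl (fun st j =>
          if PySem.List.pyGetD (PySem.List.pyGetD st.1 i []) j 0 = 1 then
            (bFill (5 * N + 2) st.1 rows cols st.2 [(i, j)], st.2 + 1)
          else st) st) (m, id) := by
  induction is with
  | nil => intro m id hm hid hr hc his; rfl
  | cons i is ih =>
    intro m id hm hid hr hc his
    have hi : 0 ≤ i := his i (by simp)
    have hjs : ∀ j ∈ PySem.List.pyRange 0 cols 1, 0 ≤ j := by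
      intro j hj
      exact (PySem.List.mem_pyRange_one.mp hj).1
    simp only [List.foldl_cons]
    have hAB : pvRowScanA (N + 1) cols (m, id) i
        = (PySem.List.pyRange 0 cols 1).foldl (fun st j =>
            if PySem.List.pyGetD (PySem.List.pyGetD st.1 i []) j 0 = 1 then
              (bFill (5 * N + 2) st.1 rows cols st.2 [(i, j)], st.2 + 1)
            else st) (m, id) :=
      inner_eq N rows cols _ m id i hm hid hi hr hc hjs
    have hinv := inner_inv N (PySem.List.pyRange 0 cols 1) m id i hm hid
    rw [← hAB]
    have := ih (pvRowScanA (N + 1) cols (m, id) i).1 (pvRowScanA (N + 1) cols (m, id) i).2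
      hinv.1 hinv.2.1 (by rw [show (pvRowScanA (N + 1) cols (m, id) i).1.length = m.length from hinv.2.2.1]; exact hr)
      (by rw [show ((pvRowScanA (N + 1) cols (m, id) i).1.headD []).length = (m.headD []).length from hinv.2.2.2]; exact hc)
      (fun x hx => his x (by simp [hx]))
    simpa using this

theorem ones_le_cells (m : List (List Int)) : pvOnes m ≤ (m.map List.length).sum := by
  induction m with
  | nil => simp [pvOnes]
  | cons r t ih =>
    simp [pvOnes]
    have := List.count_le_length (l := r) (a := (1 : Int))
    omega

-- ===== VERDICT (by name: the statement is the Claim_ definition above) =====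
theorem mark_all_islands_spec : Claim_equal_mark_all_islands := by
  intro matrix _ _
  unfold Spec_mark_all_islands mark_all_islands mark_all_islands_alt
  split
  · rfl
  · have hflat :
        (bCells (matrix.length : Int) ((matrix.headD []).length : Int)).foldl
          (fun st c =>
            if PySem.List.pyGetD (PySem.List.pyGetD st.1 c.1 []) c.2 0 = 1 then
              (bFill (5 * (matrix.map List.length).sum + 2) st.1 (matrix.length : Int) ((matrix.headD []).length : Int) st.2 [c], st.2 + 1)
            else st) (matrix, 2)
          = (PySem.List.pyRange 0 (matrix.length : Int) 1).foldl
              (fun st i => (PySem.List.pyRange 0 ((matrix.headD []).length : Int) 1).foldl (fun st j =>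
                if PySem.List.pyGetD (PySem.List.pyGetD st.1 i []) j 0 = 1 then
                  (bFill (5 * (matrix.map List.length).sum + 2) st.1 (matrix.length : Int) ((matrix.headD []).length : Int) st.2 [(i, j)], st.2 + 1)
                else st) st) (matrix, 2) := by
      unfold bCells
      rw [List.foldl_flatMap]
      simp only [List.foldl_map]
    have h := outer_eq ((matrix.map List.length).sum) (matrix.length : Int) ((matrix.headD []).length : Int)
      (PySem.List.pyRange 0 (matrix.length : Int) 1) matrix 2 (ones_le_cells matrix) (by omega)
      rfl rfl (fun x hx => (PySem.List.mem_pyRange_one.mp hx).1)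
    simp only [h, hflat]
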